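-- pv_equiv track=rewrite | github.com/Nemeca99/Magic | diophantine_constructor.py | square_pairs_for_center
-- ===== SOURCE A (Python) =====
-- import math
-- from typing import List, Sequence, Tuple, Dict
--
-- def is_perfect_square(n: int) -> bool:
--     if n <= 0:
--         return False
--     r = int(math.isqrt(n))
--     return r * r == n
--
-- def square_pairs_for_center(C: int) -> List[Tuple[int, int]]:
--     """
--     For a given center C (itself a perfect square), find all ordered pairs
--     of distinct perfect squares (a, b) such that:
--
--         a + b = 2C
--         a != b
--
--     Returns pairs with a < b to keep the list canonical.
--     """
--     target = 2 * C
--     pairs: List[Tuple[int, int]] = []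
--
--     # a and b are positive perfect squares strictly less than 2C
--     max_root = int(math.isqrt(target - 1))
--     for x in range(1, max_root + 1):
--         a = x * x
--         b = target - a
--         if b <= 0:
--             continue
--         if not is_perfect_square(b):
--             continue
--         if a == b:
--             continue
--         if a > b:
--             a, b = b, a
--         pair = (a, b)
--         if pair not in pairs:
--             pairs.append(pair)
--     return pairs
-- ===== SOURCE B (Python) =====
-- import math
-- from typing import List, Tuple
--
-- def square_pairs_for_center(C: int) -> List[Tuple[int, int]]:
--     """Two-pointer scan over square roots: no perfect-square test, no dedup."""
--     target = 2 * C
--     hi = math.isqrt(target - 1)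
--     lo = 1
--     pairs: List[Tuple[int, int]] = []
--     while lo < hi:
--         s = lo * lo + hi * hi
--         if s < target:
--             lo += 1
--         elif s > target:
--             hi -= 1
--         else:
--             pairs.append((lo * lo, hi * hi))
--             lo += 1
--             hi -= 1
--     return pairs
-- ===== Notes on version B (the rewrite author's own statement) =====
-- stated objective: faster
-- what changed: Replaced the per-candidate perfect-square test plus list-membership dedup with a single two-pointer scan over square roots that emits each a<b pair once in increasing order.
import Mathlib
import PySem

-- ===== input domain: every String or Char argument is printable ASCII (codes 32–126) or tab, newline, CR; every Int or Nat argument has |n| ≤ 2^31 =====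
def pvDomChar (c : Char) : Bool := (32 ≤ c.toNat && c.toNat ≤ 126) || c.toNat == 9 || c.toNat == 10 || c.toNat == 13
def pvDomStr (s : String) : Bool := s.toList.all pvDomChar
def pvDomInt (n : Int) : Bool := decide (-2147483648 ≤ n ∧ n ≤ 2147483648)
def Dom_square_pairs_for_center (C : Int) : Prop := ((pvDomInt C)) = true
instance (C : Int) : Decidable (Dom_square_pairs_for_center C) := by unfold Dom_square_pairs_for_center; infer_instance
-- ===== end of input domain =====

-- B replaces A's per-candidate perfect-square test and list-membership dedup by a single
-- two-pointer scan over square roots (objective: faster).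

-- ===== PORT A =====
-- math.isqrt n for n ≥ 0 is exactly Nat.sqrt n.toNat; n < 0 (ValueError) is excluded by Pre_.
def pyIsqrt (n : Int) : Int := (Nat.sqrt n.toNat : Int)

def is_perfect_square (n : Int) : Bool :=
  if n ≤ 0 then false
  else
    let r := pyIsqrt n
    r * r == n

def aBody (target : Int) (pairs : List (Int × Int)) (x : Int) : List (Int × Int) :=
  let a := x * x
  let b := target - a
  if b ≤ 0 then pairs
  else if is_perfect_square b = false then pairs
  else if a = b then pairs
  else
    let p := if a > b then (b, a) else (a, b)
    if p ∈ pairs then pairs else pairs ++ [p]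

def square_pairs_for_center (C : Int) : List (Int × Int) :=
  let target := 2 * C
  let max_root := pyIsqrt (target - 1)
  (PySem.List.pyRange 1 (max_root + 1) 1).foldl (aBody target) []

-- ===== PORT B =====
def twoPtr (target lo hi : Int) (pairs : List (Int × Int)) : List (Int × Int) :=
  if h : lo < hi then
    let s := lo * lo + hi * hi
    if s < target then twoPtr target (lo + 1) hi pairs
    else if s > target then twoPtr target lo (hi - 1) pairs
    else twoPtr target (lo + 1) (hi - 1) (pairs ++ [(lo * lo, hi * hi)])
  else pairs
termination_by (hi - lo).toNat
decreasing_by all_goals omega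

def square_pairs_for_center_alt (C : Int) : List (Int × Int) :=
  let target := 2 * C
  let hi := pyIsqrt (target - 1)
  twoPtr target 1 hi []

-- ===== PRECONDITION & SPEC =====
-- A calls math.isqrt(2*C - 1), which raises ValueError for C ≤ 0; such C are excluded.
def Pre_square_pairs_for_center (C : Int) : Prop := 1 ≤ C
instance (C : Int) : Decidable (Pre_square_pairs_for_center C) := by
  unfold Pre_square_pairs_for_center; infer_instance

def pvWitness_square_pairs_for_center : Int := 25

def Spec_square_pairs_for_center (C : Int) (out : List (Int × Int)) : Prop := out = square_pairs_for_center_alt C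
instance (C : Int) (out : List (Int × Int)) : Decidable (Spec_square_pairs_for_center C out) := by
  unfold Spec_square_pairs_for_center; infer_instance

-- ===== CLAIM (what is proved, stated in full; the proofs are below) =====
def Claim_equal_square_pairs_for_center : Prop := ∀ (C : Int), Dom_square_pairs_for_center C → Pre_square_pairs_for_center C → Spec_square_pairs_for_center C (square_pairs_for_center C)

-- ===== LEMMAS AND PROOFS =====

-- strict order on the first components; both outputs are sorted by it
def fstLt (p q : Int × Int) : Prop := p.1 < q.1

-- the common characterisation: p is a pair of distinct positive squares summing to 2C, a < b
def IsGood (C : Int) (p : Int × Int) : Prop :=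
  ∃ x y : Int, 1 ≤ x ∧ x < y ∧ x * x + y * y = 2 * C ∧ p = (x * x, y * y)

-- pairs already produced by A's loop before iteration k
def GoodBelow (C k : Int) (p : Int × Int) : Prop :=
  ∃ x y : Int, 1 ≤ x ∧ x < k ∧ x < y ∧ x * x + y * y = 2 * C ∧ p = (x * x, y * y)

-- pairs the two-pointer window [lo, hi] can still produce
def Win (t lo hi : Int) (p : Int × Int) : Prop :=
  ∃ x y : Int, lo ≤ x ∧ x < y ∧ y ≤ hi ∧ x * x + y * y = t ∧ p = (x * x, y * y)

lemma sq_lt_of_lt {x y : Int} (hx : 0 ≤ x) (h : x < y) : x * x < y * y := by nlinarith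

lemma sq_le_of_le {x y : Int} (hx : 0 ≤ x) (h : x ≤ y) : x * x ≤ y * y := by nlinarith

lemma sq_inj {x y : Int} (hx : 0 ≤ x) (hy : 0 ≤ y) (h : x * x = y * y) : x = y := by
  rcases lt_trichotomy x y with h' | h' | h'
  · have := sq_lt_of_lt hx h'; omega
  · exact h'
  · have := sq_lt_of_lt hy h'; omega

lemma pyIsqrt_nonneg (m : Int) : 0 ≤ pyIsqrt m := by
  unfold pyIsqrt; exact Int.natCast_nonneg _

lemma le_pyIsqrt {x m : Int} (hx : 0 ≤ x) (h : x * x ≤ m) : x ≤ pyIsqrt m := by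
  have hm : 0 ≤ m := le_trans (mul_self_nonneg x) h
  have hx' : (x.toNat : Int) = x := Int.toNat_of_nonneg hx
  have h1 : x.toNat * x.toNat ≤ m.toNat := by
    have : ((x.toNat * x.toNat : Nat) : Int) ≤ ((m.toNat : Nat) : Int) := by
      push_cast; rw [hx', Int.toNat_of_nonneg hm]; exact h
    exact_mod_cast this
  have h2 : x.toNat ≤ Nat.sqrt m.toNat := Nat.le_sqrt.mpr h1
  unfold pyIsqrt; omega

lemma sq_pyIsqrt_le {m : Int} (hm : 0 ≤ m) : pyIsqrt m * pyIsqrt m ≤ m := by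
  have h : Nat.sqrt m.toNat * Nat.sqrt m.toNat ≤ m.toNat := by
    have := Nat.sqrt_le' m.toNat
    simpa [pow_two] using this
  unfold pyIsqrt
  have : ((Nat.sqrt m.toNat * Nat.sqrt m.toNat : Nat) : Int) ≤ ((m.toNat : Nat) : Int) :=
    by exact_mod_cast h
  push_cast at this
  omega

lemma pyIsqrt_sq {x : Int} (hx : 0 ≤ x) : pyIsqrt (x * x) = x := by
  have hx' : (x.toNat : Int) = x := Int.toNat_of_nonneg hx
  have h : (x * x).toNat = x.toNat * x.toNat := by
    have : ((x.toNat * x.toNat : Nat) : Int) = x * x := by push_cast; rw [hx']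
    omega
  unfold pyIsqrt
  rw [h, show x.toNat * x.toNat = x.toNat ^ 2 from (pow_two _).symm, Nat.sqrt_eq']
  exact hx'

lemma isps_iff (b : Int) : is_perfect_square b = true ↔ ∃ r : Int, 1 ≤ r ∧ r * r = b := by
  unfold is_perfect_square
  constructor
  · intro h
    split_ifs at h with hb
    simp only [beq_iff_eq] at h
    have hnn := pyIsqrt_nonneg b
    have h1 : 1 ≤ pyIsqrt b := by
      rcases hnn.lt_or_eq with h' | h'
      · omega
      · exfalso; rw [← h'] at h; simp at h; omega
    exact ⟨pyIsqrt b, h1, h⟩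
  · rintro ⟨r, hr, hrr⟩
    have hb : ¬ b ≤ 0 := by nlinarith
    rw [if_neg hb]
    simp only [beq_iff_eq]
    rw [← hrr, pyIsqrt_sq (by omega)]

-- ---- A side ----

lemma A_inv (C : Int) (hC : 1 ≤ C) :
    ∀ (n : Nat) (x : Int) (acc : List (Int × Int)),
      1 ≤ x → x + (n : Int) = pyIsqrt (2 * C - 1) + 1 →
      (∀ p, p ∈ acc ↔ GoodBelow C x p) →
      acc.Pairwise fstLt →
      (∀ p, p ∈ (PySem.List.pyRange x (pyIsqrt (2 * C - 1) + 1) 1).foldl (aBody (2 * C)) acc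
          ↔ IsGood C p)
      ∧ ((PySem.List.pyRange x (pyIsqrt (2 * C - 1) + 1) 1).foldl (aBody (2 * C)) acc).Pairwise fstLt := by
  intro n
  induction n with
  | zero =>
    intro x acc hx hend hmem hpw
    have hx' : x = pyIsqrt (2 * C - 1) + 1 := by push_cast at hend; omega
    rw [PySem.List.pyRange_one_eq_nil (by omega)]
    simp only [List.foldl_nil]
    refine ⟨fun p => ?_, hpw⟩
    rw [hmem p]
    constructor
    · rintro ⟨u, v, hu, _, huv, hsum, hp⟩; exact ⟨u, v, hu, huv, hsum, hp⟩
    · rintro ⟨u, v, hu, huv, hsum, hp⟩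
      refine ⟨u, v, hu, ?_, huv, hsum, hp⟩
      have hv1 : 1 ≤ v := by omega
      have : u * u ≤ 2 * C - 1 := by nlinarith
      have := le_pyIsqrt (by omega : (0:Int) ≤ u) this
      omega
  | succ n ih =>
    intro x acc hx hend hmem hpw
    have hxM : x ≤ pyIsqrt (2 * C - 1) := by push_cast at hend; omega
    rw [PySem.List.pyRange_one_cons (by omega)]
    simp only [List.foldl_cons]
    have hm0 : (0:Int) ≤ 2 * C - 1 := by omega
    have hxx : x * x ≤ 2 * C - 1 := by
      calc x * x ≤ pyIsqrt (2 * C - 1) * pyIsqrt (2 * C - 1) := sq_le_of_le (by omega) hxM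
        _ ≤ 2 * C - 1 := sq_pyIsqrt_le hm0
    have hbpos : ¬ (2 * C - x * x ≤ 0) := by omega
    -- the new accumulator after processing x
    have key : (∀ p, p ∈ aBody (2 * C) acc x ↔ GoodBelow C (x + 1) p)
        ∧ (aBody (2 * C) acc x).Pairwise fstLt := by
      unfold aBody
      simp only [if_neg hbpos]
      by_cases hps : is_perfect_square (2 * C - x * x) = true
      · obtain ⟨r, hr1, hrr⟩ := (isps_iff _).mp hps
        rw [if_neg (by simp [hps])]
        by_cases hab : x * x = 2 * C - x * x
        · -- a = b : skipped; no new good pair with first root x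
          rw [if_pos hab]
          refine ⟨fun p => ?_, hpw⟩
          rw [hmem p]
          constructor
          · rintro ⟨u, v, hu, hult, huv, hsum, hp⟩; exact ⟨u, v, hu, by omega, huv, hsum, hp⟩
          · rintro ⟨u, v, hu, hult, huv, hsum, hp⟩
            refine ⟨u, v, hu, ?_, huv, hsum, hp⟩
            rcases (by omega : u < x ∨ u = x) with h | h
            · exact h
            · exfalso; subst h
              have : v * v = u * u := by omega
              have := sq_inj (by omega : (0:Int) ≤ v) (by omega : (0:Int) ≤ u) this
              omega
        · rw [if_neg hab]
          by_cases hgt : x * x > 2 * C - x * x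
          · -- a > b : the swapped pair was already produced at iteration r < x
            rw [if_pos hgt]
            have hrx : r < x := by
              by_contra h
              have := sq_le_of_le (by omega : (0:Int) ≤ x) (by omega : x ≤ r)
              omega
            have hin : (2 * C - x * x, x * x) ∈ acc := by
              rw [hmem]
              exact ⟨r, x, hr1, hrx, hrx, by omega, by rw [hrr]⟩
            rw [if_pos hin]
            refine ⟨fun p => ?_, hpw⟩
            rw [hmem p]
            constructor
            · rintro ⟨u, v, hu, hult, huv, hsum, hp⟩; exact ⟨u, v, hu, by omega, huv, hsum, hp⟩
            · rintro ⟨u, v, hu, hult, huv, hsum, hp⟩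
              refine ⟨u, v, hu, ?_, huv, hsum, hp⟩
              rcases (by omega : u < x ∨ u = x) with h | h
              · exact h
              · exfalso; subst h
                have : v * v < u * u := by omega
                have := sq_lt_of_lt (by omega : (0:Int) ≤ u) huv
                omega
          · -- a < b : a genuinely new pair is appended
            rw [if_neg hgt]
            have hxr : x < r := by
              by_contra h
              have := sq_le_of_le (by omega : (0:Int) ≤ r) (by omega : r ≤ x)
              omega
            have hnin : (x * x, 2 * C - x * x) ∉ acc := by
              rw [hmem]
              rintro ⟨u, v, hu, hult, huv, hsum, hp⟩
              simp only [Prod.mk.injEq] at hp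
              have := sq_inj (by omega : (0:Int) ≤ x) (by omega : (0:Int) ≤ u) hp.1
              omega
            rw [if_neg hnin]
            refine ⟨fun p => ?_, ?_⟩
            · rw [List.mem_append, List.mem_singleton, hmem p]
              constructor
              · rintro (⟨u, v, hu, hult, huv, hsum, hp⟩ | hp)
                · exact ⟨u, v, hu, by omega, huv, hsum, hp⟩
                · exact ⟨x, r, by omega, by omega, hxr, by omega, by rw [hp, hrr]⟩
              · rintro ⟨u, v, hu, hult, huv, hsum, hp⟩
                rcases (by omega : u < x ∨ u = x) with h | h
                · exact Or.inl ⟨u, v, hu, h, huv, hsum, hp⟩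
                · subst h
                  right
                  have hv : v * v = 2 * C - u * u := by omega
                  rw [hp, hv]
            · -- Pairwise: every old element has smaller first component
              apply List.pairwise_append.mpr
              refine ⟨hpw, List.pairwise_singleton _ _, ?_⟩
              intro q hq p' hp'
              rw [List.mem_singleton] at hp'
              obtain ⟨u, v, hu, hult, huv, hsum, hqeq⟩ := (hmem q).mp hq
              have : u * u < x * x := sq_lt_of_lt (by omega) hult
              rw [hp', hqeq]
              simpa [fstLt] using this
      · -- b is not a perfect square: skipped, and no good pair has first root x
        rw [if_pos (by simpa using hps)]
        refine ⟨fun p => ?_, hpw⟩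
        rw [hmem p]
        constructor
        · rintro ⟨u, v, hu, hult, huv, hsum, hp⟩; exact ⟨u, v, hu, by omega, huv, hsum, hp⟩
        · rintro ⟨u, v, hu, hult, huv, hsum, hp⟩
          refine ⟨u, v, hu, ?_, huv, hsum, hp⟩
          rcases (by omega : u < x ∨ u = x) with h | h
          · exact h
          · exfalso; subst h
            exact hps ((isps_iff _).mpr ⟨v, by omega, by omega⟩)
    exact ih (x + 1) (aBody (2 * C) acc x) (by omega) (by push_cast at hend ⊢; omega)
      key.1 key.2

lemma A_char (C : Int) (hC : 1 ≤ C) :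
    (∀ p, p ∈ square_pairs_for_center C ↔ IsGood C p)
    ∧ (square_pairs_for_center C).Pairwise fstLt := by
  unfold square_pairs_for_center
  have hM : 0 ≤ pyIsqrt (2 * C - 1) := pyIsqrt_nonneg _
  exact A_inv C hC (pyIsqrt (2 * C - 1)).toNat 1 [] (by omega) (by omega)
    (by intro p; simp [GoodBelow]; rintro u v hu hult; omega)
    (List.Pairwise.nil)

-- ---- B side ----

lemma B_inv (t : Int) :
    ∀ (n : Nat) (lo hi : Int) (acc : List (Int × Int)),
      (hi - lo).toNat = n → 1 ≤ lo →
      acc.Pairwise fstLt → (∀ q ∈ acc, q.1 < lo * lo) →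
      (∀ p, p ∈ twoPtr t lo hi acc ↔ p ∈ acc ∨ Win t lo hi p)
      ∧ (twoPtr t lo hi acc).Pairwise fstLt := by
  intro n
  induction n using Nat.strong_induction_on with
  | _ n ih =>
    intro lo hi acc hn hlo hpw hlt
    rw [twoPtr]
    by_cases h : lo < hi
    · rw [dif_pos h]
      simp only []
      by_cases h1 : lo * lo + hi * hi < t
      · rw [if_pos h1]
        have res := ih (hi - (lo + 1)).toNat (by omega) (lo + 1) hi acc rfl (by omega) hpw
          (fun q hq => lt_trans (hlt q hq) (sq_lt_of_lt (by omega) (by omega)))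
        refine ⟨fun p => ?_, res.2⟩
        rw [res.1 p]
        constructor
        · rintro (hp | ⟨u, v, hu, huv, hvhi, hsum, hp⟩)
          · exact Or.inl hp
          · exact Or.inr ⟨u, v, by omega, huv, hvhi, hsum, hp⟩
        · rintro (hp | ⟨u, v, hu, huv, hvhi, hsum, hp⟩)
          · exact Or.inl hp
          · refine Or.inr ⟨u, v, ?_, huv, hvhi, hsum, hp⟩
            rcases (by omega : lo < u ∨ u = lo) with h' | h'
            · omega
            · exfalso; subst h'
              have : v * v ≤ hi * hi := sq_le_of_le (by omega) hvhi
              omega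
      · rw [if_neg h1]
        by_cases h2 : lo * lo + hi * hi > t
        · rw [if_pos h2]
          have res := ih (hi - 1 - lo).toNat (by omega) lo (hi - 1) acc rfl hlo hpw hlt
          refine ⟨fun p => ?_, res.2⟩
          rw [res.1 p]
          constructor
          · rintro (hp | ⟨u, v, hu, huv, hvhi, hsum, hp⟩)
            · exact Or.inl hp
            · exact Or.inr ⟨u, v, hu, huv, by omega, hsum, hp⟩
          · rintro (hp | ⟨u, v, hu, huv, hvhi, hsum, hp⟩)
            · exact Or.inl hp
            · refine Or.inr ⟨u, v, hu, huv, ?_, hsum, hp⟩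
              rcases (by omega : v < hi ∨ v = hi) with h' | h'
              · omega
              · exfalso; subst h'
                have : lo * lo ≤ u * u := sq_le_of_le (by omega) hu
                omega
        · -- exact hit: emit (lo², hi²)
          rw [if_neg h2]
          have hs : lo * lo + hi * hi = t := by omega
          have hlt' : ∀ q ∈ acc ++ [(lo * lo, hi * hi)], q.1 < (lo + 1) * (lo + 1) := by
            intro q hq
            rcases List.mem_append.mp hq with hq | hq
            · exact lt_trans (hlt q hq) (sq_lt_of_lt (by omega) (by omega))
            · rw [List.mem_singleton] at hq
              rw [hq]
              exact sq_lt_of_lt (by omega) (by omega)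
          have hpw' : (acc ++ [(lo * lo, hi * hi)]).Pairwise fstLt := by
            apply List.pairwise_append.mpr
            refine ⟨hpw, List.pairwise_singleton _ _, ?_⟩
            intro q hq p' hp'
            rw [List.mem_singleton] at hp'
            rw [hp']
            exact hlt q hq
          have res := ih (hi - 1 - (lo + 1)).toNat (by omega) (lo + 1) (hi - 1)
            (acc ++ [(lo * lo, hi * hi)]) rfl (by omega) hpw' hlt'
          refine ⟨fun p => ?_, res.2⟩
          rw [res.1 p, List.mem_append, List.mem_singleton]
          constructor
          · rintro ((hp | hp) | ⟨u, v, hu, huv, hvhi, hsum, hp⟩)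
            · exact Or.inl hp
            · exact Or.inr ⟨lo, hi, le_refl _, h, le_refl _, hs, hp⟩
            · exact Or.inr ⟨u, v, by omega, huv, by omega, hsum, hp⟩
          · rintro (hp | ⟨u, v, hu, huv, hvhi, hsum, hp⟩)
            · exact Or.inl (Or.inl hp)
            · rcases (by omega : u = lo ∨ lo + 1 ≤ u) with h' | h'
              · subst h'
                have hv : v * v = hi * hi := by omega
                have : v = hi := sq_inj (by omega) (by omega) hv
                subst this
                exact Or.inl (Or.inr hp)
              · refine Or.inr ⟨u, v, h', huv, ?_, hsum, hp⟩
                rcases (by omega : v ≤ hi - 1 ∨ v = hi) with h'' | h''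
                · exact h''
                · exfalso; subst h''
                  have hu' : u * u = lo * lo := by omega
                  have := sq_inj (by omega : (0:Int) ≤ u) (by omega : (0:Int) ≤ lo) hu'
                  omega
    · rw [dif_neg h]
      refine ⟨fun p => ?_, hpw⟩
      constructor
      · exact Or.inl
      · rintro (hp | ⟨u, v, hu, huv, hvhi, hsum, hp⟩)
        · exact hp
        · exfalso; omega

lemma B_char (C : Int) (hC : 1 ≤ C) :
    (∀ p, p ∈ square_pairs_for_center_alt C ↔ IsGood C p)
    ∧ (square_pairs_for_center_alt C).Pairwise fstLt := by
  unfold square_pairs_for_center_alt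
  simp only []
  have res := B_inv (2 * C) (pyIsqrt (2 * C - 1) - 1).toNat 1 (pyIsqrt (2 * C - 1)) []
    rfl (by omega) List.Pairwise.nil (by simp)
  refine ⟨fun p => ?_, res.2⟩
  rw [res.1 p]
  simp only [List.not_mem_nil, false_or]
  constructor
  · rintro ⟨u, v, hu, huv, hvhi, hsum, hp⟩
    exact ⟨u, v, hu, huv, hsum, hp⟩
  · rintro ⟨u, v, hu, huv, hsum, hp⟩
    refine ⟨u, v, hu, huv, ?_, hsum, hp⟩
    have : v * v ≤ 2 * C - 1 := by nlinarith
    exact le_pyIsqrt (by omega) this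

-- two lists strictly sorted on first components with the same members are equal
lemma eq_of_pairwise_fst :
    ∀ (l₁ l₂ : List (Int × Int)), l₁.Pairwise fstLt → l₂.Pairwise fstLt →
      (∀ p, p ∈ l₁ ↔ p ∈ l₂) → l₁ = l₂ := by
  intro l₁
  induction l₁ with
  | nil =>
    intro l₂ _ _ hm
    cases l₂ with
    | nil => rfl
    | cons q t => exact absurd ((hm q).mpr (List.mem_cons_self)) (List.not_mem_nil)
  | cons p t ih =>
    intro l₂ h₁ h₂ hm
    cases l₂ with
    | nil => exact absurd ((hm p).mp (List.mem_cons_self)) (List.not_mem_nil)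
    | cons q t₂ =>
      rw [List.pairwise_cons] at h₁ h₂
      have hpq : p = q := by
        rcases List.mem_cons.mp ((hm p).mp List.mem_cons_self) with h | h
        · exact h
        · rcases List.mem_cons.mp ((hm q).mpr List.mem_cons_self) with h' | h'
          · exact h'.symm
          · have := h₂.1 p h
            have := h₁.1 q h'
            unfold fstLt at *
            omega
      subst hpq
      have hmt : ∀ a, a ∈ t ↔ a ∈ t₂ := by
        intro a
        constructor
        · intro ha
          have h1 := h₁.1 a ha
          rcases List.mem_cons.mp ((hm a).mp (List.mem_cons_of_mem _ ha)) with h | h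
          · exfalso; rw [h] at h1; unfold fstLt at h1; omega
          · exact h
        · intro ha
          have h1 := h₂.1 a ha
          rcases List.mem_cons.mp ((hm a).mpr (List.mem_cons_of_mem _ ha)) with h | h
          · exfalso; rw [h] at h1; unfold fstLt at h1; omega
          · exact h
      rw [ih t₂ h₁.2 h₂.2 hmt]

-- ===== VERDICT (by name: the statement is the Claim_ definition above) =====
theorem square_pairs_for_center_spec : Claim_equal_square_pairs_for_center := by
  intro C _ hPre
  unfold Spec_square_pairs_for_center
  obtain ⟨hAm, hApw⟩ := A_char C hPre
  obtain ⟨hBm, hBpw⟩ := B_char C hPre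
  exact eq_of_pairwise_fst _ _ hApw hBpw (fun p => (hAm p).trans (hBm p).symm)
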